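-- pv_equiv track=rewrite | github.com/arang125/codingtest | 프로그래머스/모의고사.py | solution
-- ===== SOURCE A (Python) =====
-- def solution(answers):
--     answer = []
--     score = [0, 0, 0]
--     answer_1 = []
--     answer_2 = []
--     answer_3 = []
--
--     # 1
--     for i in range(1, len(answers)+1):
--         if i%5 > 0:
--             answer_1.append(i%5)
--         else:
--             answer_1.append(5)
--
--     # 2
--     for i in range(1, len(answers)+1):
--         if i%8 in [1,3,5,7]:
--             answer_2.append(2)
--         elif i%8 == 2:
--             answer_2.append(1)
--         elif i%8 == 4:
--             answer_2.append(3)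
--         elif i%8 == 6:
--             answer_2.append(4)
--         else:
--             answer_2.append(5)
--
--     # 3
--     for i in range(1, len(answers)+1):
--         if i % 10 in [1,2]:
--             answer_3.append(3)
--         elif i % 10 in [3,4]:
--             answer_3.append(1)
--         elif i % 10 in [5,6]:
--             answer_3.append(2)
--         elif i % 10 in [7,8]:
--             answer_3.append(4)
--         else:
--             answer_3.append(5)
--
--     for i in range(len(answers)):
--         if answers[i] == answer_1[i]:
--             score[0] += 1
--         if answers[i] == answer_2[i]:
--             score[1] += 1
--         if answers[i] == answer_3[i]:
--             score[2] += 1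
--
--     if score.count(max(score)) >= 1:
--         for i, num in enumerate(score):
--             if num == max(score):
--                 answer.append(i+1)
--
--     answer.sort()
--     return answer
-- ===== SOURCE B (Python) =====
-- def solution(answers):
--     p1 = [1, 2, 3, 4, 5]
--     p2 = [2, 1, 2, 3, 2, 4, 2, 5]
--     p3 = [3, 3, 1, 1, 2, 2, 4, 4, 5, 5]
--     score = [0, 0, 0]
--     for i, a in enumerate(answers):
--         if a == p1[i % 5]:
--             score[0] += 1
--         if a == p2[i % 8]:
--             score[1] += 1
--         if a == p3[i % 10]:
--             score[2] += 1
--     m = max(score)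
--     return [k + 1 for k in range(3) if score[k] == m]
-- ===== Notes on version B (the rewrite author's own statement) =====
-- stated objective: simpler
-- what changed: B replaces A's three precomputed full-length answer tables (each built by a chain of mod-condition branches) plus a separate compare pass and an enumerate/count/sort finish with one single pass over answers that indexes three fixed short cycle lists by i % len(cycle) and a comprehension over range(3) for the already-sorted result.
import Mathlib
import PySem

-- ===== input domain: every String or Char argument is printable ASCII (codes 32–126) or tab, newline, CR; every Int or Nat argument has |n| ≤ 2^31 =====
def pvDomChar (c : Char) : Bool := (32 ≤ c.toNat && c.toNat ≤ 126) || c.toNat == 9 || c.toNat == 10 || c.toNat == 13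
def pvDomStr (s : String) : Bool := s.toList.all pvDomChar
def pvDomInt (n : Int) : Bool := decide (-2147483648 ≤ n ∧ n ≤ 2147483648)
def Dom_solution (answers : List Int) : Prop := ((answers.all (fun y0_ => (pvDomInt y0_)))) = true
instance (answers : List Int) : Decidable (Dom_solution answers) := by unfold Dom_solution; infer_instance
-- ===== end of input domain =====

-- B replaces A's three precomputed full-length answer tables and separate compare/enumerate/sort passes
-- with one single pass indexing fixed short cycle lists by i % len(cycle) (objective: simpler; same O(n)).

-- ===== PORT A =====
def solution (answers : List Int) : List Int :=
  let n : Int := (answers.length : Int)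
  let score : Int × Int × Int := (0, 0, 0)
  let answer_1 : List Int := (PySem.List.pyRange 1 (n + 1) 1).foldl (fun acc i =>
      if PySem.Int.mod i 5 > 0 then acc ++ [PySem.Int.mod i 5] else acc ++ [5]) []
  let answer_2 : List Int := (PySem.List.pyRange 1 (n + 1) 1).foldl (fun acc i =>
      if [(1 : Int), 3, 5, 7].contains (PySem.Int.mod i 8) then acc ++ [2]
      else if PySem.Int.mod i 8 = 2 then acc ++ [1]
      else if PySem.Int.mod i 8 = 4 then acc ++ [3]
      else if PySem.Int.mod i 8 = 6 then acc ++ [4]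
      else acc ++ [5]) []
  let answer_3 : List Int := (PySem.List.pyRange 1 (n + 1) 1).foldl (fun acc i =>
      if [(1 : Int), 2].contains (PySem.Int.mod i 10) then acc ++ [3]
      else if [(3 : Int), 4].contains (PySem.Int.mod i 10) then acc ++ [1]
      else if [(5 : Int), 6].contains (PySem.Int.mod i 10) then acc ++ [2]
      else if [(7 : Int), 8].contains (PySem.Int.mod i 10) then acc ++ [4]
      else acc ++ [5]) []
  let score : Int × Int × Int := (PySem.List.pyRange 0 n 1).foldl (fun s i =>
      let s := if PySem.List.pyGetD answers i 0 = PySem.List.pyGetD answer_1 i 0 then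
                 (s.1 + 1, s.2.1, s.2.2) else s
      let s := if PySem.List.pyGetD answers i 0 = PySem.List.pyGetD answer_2 i 0 then
                 (s.1, s.2.1 + 1, s.2.2) else s
      if PySem.List.pyGetD answers i 0 = PySem.List.pyGetD answer_3 i 0 then
        (s.1, s.2.1, s.2.2 + 1) else s) score
  let scoreL : List Int := [score.1, score.2.1, score.2.2]
  let m : Int := (PySem.List.max? scoreL (fun x => x)).getD 0
  let answer : List Int :=
    if PySem.List.count scoreL m ≥ 1 then
      (PySem.List.enumerate scoreL 0).foldl (fun acc p =>
        if p.2 = m then acc ++ [p.1 + 1] else acc) []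
    else []
  PySem.List.sorted answer (fun x => x) false

-- ===== PORT B =====
def solution_alt (answers : List Int) : List Int :=
  let p1 : List Int := [1, 2, 3, 4, 5]
  let p2 : List Int := [2, 1, 2, 3, 2, 4, 2, 5]
  let p3 : List Int := [3, 3, 1, 1, 2, 2, 4, 4, 5, 5]
  let score : Int × Int × Int := (PySem.List.enumerate answers 0).foldl
    (fun (s : Int × Int × Int) ia =>
      let s := if ia.2 = PySem.List.pyGetD p1 (PySem.Int.mod ia.1 5) 0 then
                 (s.1 + 1, s.2.1, s.2.2) else s
      let s := if ia.2 = PySem.List.pyGetD p2 (PySem.Int.mod ia.1 8) 0 then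
                 (s.1, s.2.1 + 1, s.2.2) else s
      if ia.2 = PySem.List.pyGetD p3 (PySem.Int.mod ia.1 10) 0 then
        (s.1, s.2.1, s.2.2 + 1) else s)
    (0, 0, 0)
  let scoreL : List Int := [score.1, score.2.1, score.2.2]
  let m : Int := (PySem.List.max? scoreL (fun x => x)).getD 0
  (PySem.List.pyRange 0 3 1).filterMap (fun k =>
    if PySem.List.pyGetD scoreL k 0 = m then some (k + 1) else none)

-- ===== PRECONDITION & SPEC =====
def Spec_solution (answers : List Int) (out : List Int) : Prop := out = solution_alt answers
instance (answers : List Int) (out : List Int) : Decidable (Spec_solution answers out) := by unfold Spec_solution; infer_instance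

-- ===== CLAIM (what is proved, stated in full; the proofs are below) =====
def Claim_equal_solution : Prop := ∀ (answers : List Int), Dom_solution answers → Spec_solution answers (solution answers)

-- ===== LEMMAS AND PROOFS =====

-- A's three precomputed tables, as standalone definitions (definitionally the let-bound lists of `solution`)
def pvTab1 (n : Int) : List Int :=
  (PySem.List.pyRange 1 (n + 1) 1).foldl (fun acc i =>
      if PySem.Int.mod i 5 > 0 then acc ++ [PySem.Int.mod i 5] else acc ++ [5]) []
def pvTab2 (n : Int) : List Int :=
  (PySem.List.pyRange 1 (n + 1) 1).foldl (fun acc i =>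
      if [(1 : Int), 3, 5, 7].contains (PySem.Int.mod i 8) then acc ++ [2]
      else if PySem.Int.mod i 8 = 2 then acc ++ [1]
      else if PySem.Int.mod i 8 = 4 then acc ++ [3]
      else if PySem.Int.mod i 8 = 6 then acc ++ [4]
      else acc ++ [5]) []
def pvTab3 (n : Int) : List Int :=
  (PySem.List.pyRange 1 (n + 1) 1).foldl (fun acc i =>
      if [(1 : Int), 2].contains (PySem.Int.mod i 10) then acc ++ [3]
      else if [(3 : Int), 4].contains (PySem.Int.mod i 10) then acc ++ [1]
      else if [(5 : Int), 6].contains (PySem.Int.mod i 10) then acc ++ [2]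
      else if [(7 : Int), 8].contains (PySem.Int.mod i 10) then acc ++ [4]
      else acc ++ [5]) []

def pvScoreA (answers : List Int) : Int × Int × Int :=
  (PySem.List.pyRange 0 (answers.length : Int) 1).foldl (fun s i =>
      let s := if PySem.List.pyGetD answers i 0 = PySem.List.pyGetD (pvTab1 (answers.length : Int)) i 0 then
                 (s.1 + 1, s.2.1, s.2.2) else s
      let s := if PySem.List.pyGetD answers i 0 = PySem.List.pyGetD (pvTab2 (answers.length : Int)) i 0 then
                 (s.1, s.2.1 + 1, s.2.2) else s
      if PySem.List.pyGetD answers i 0 = PySem.List.pyGetD (pvTab3 (answers.length : Int)) i 0 then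
        (s.1, s.2.1, s.2.2 + 1) else s) (0, 0, 0)

def pvScoreB (answers : List Int) : Int × Int × Int :=
  (PySem.List.enumerate answers 0).foldl
    (fun (s : Int × Int × Int) ia =>
      let s := if ia.2 = PySem.List.pyGetD [1, 2, 3, 4, 5] (PySem.Int.mod ia.1 5) 0 then
                 (s.1 + 1, s.2.1, s.2.2) else s
      let s := if ia.2 = PySem.List.pyGetD [2, 1, 2, 3, 2, 4, 2, 5] (PySem.Int.mod ia.1 8) 0 then
                 (s.1, s.2.1 + 1, s.2.2) else s
      if ia.2 = PySem.List.pyGetD [3, 3, 1, 1, 2, 2, 4, 4, 5, 5] (PySem.Int.mod ia.1 10) 0 then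
        (s.1, s.2.1, s.2.2 + 1) else s)
    (0, 0, 0)

def pvFinalA (sc : Int × Int × Int) : List Int :=
  let scoreL : List Int := [sc.1, sc.2.1, sc.2.2]
  let m : Int := (PySem.List.max? scoreL (fun x => x)).getD 0
  let answer : List Int :=
    if PySem.List.count scoreL m ≥ 1 then
      (PySem.List.enumerate scoreL 0).foldl (fun acc p =>
        if p.2 = m then acc ++ [p.1 + 1] else acc) []
    else []
  PySem.List.sorted answer (fun x => x) false

def pvFinalB (sc : Int × Int × Int) : List Int :=
  let scoreL : List Int := [sc.1, sc.2.1, sc.2.2]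
  let m : Int := (PySem.List.max? scoreL (fun x => x)).getD 0
  (PySem.List.pyRange 0 3 1).filterMap (fun k =>
    if PySem.List.pyGetD scoreL k 0 = m then some (k + 1) else none)

theorem pvSolA (answers : List Int) : solution answers = pvFinalA (pvScoreA answers) := rfl
theorem pvSolB (answers : List Int) : solution_alt answers = pvFinalB (pvScoreB answers) := rfl

-- pattern lemmas: A's table entry at 0-based position k equals B's cycle lookup
theorem pvPat1 (k : Nat) :
    (if PySem.Int.mod (1 + (k : Int)) 5 > 0 then PySem.Int.mod (1 + (k : Int)) 5 else 5)
    = PySem.List.pyGetD [1, 2, 3, 4, 5] (PySem.Int.mod (k : Int) 5) 0 := by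
  simp only [PySem.Int.mod_eq_emod_of_pos (show (0:Int) < 5 by norm_num)]
  have h : (k:Int) % 5 = 0 ∨ (k:Int) % 5 = 1 ∨ (k:Int) % 5 = 2 ∨ (k:Int) % 5 = 3 ∨ (k:Int) % 5 = 4 := by omega
  rcases h with h|h|h|h|h
  · rw [h, show (1 + (k:Int)) % 5 = 1 from by omega]; decide
  · rw [h, show (1 + (k:Int)) % 5 = 2 from by omega]; decide
  · rw [h, show (1 + (k:Int)) % 5 = 3 from by omega]; decide
  · rw [h, show (1 + (k:Int)) % 5 = 4 from by omega]; decide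
  · rw [h, show (1 + (k:Int)) % 5 = 0 from by omega]; decide

theorem pvPat2 (k : Nat) :
    (if [(1 : Int), 3, 5, 7].contains (PySem.Int.mod (1 + (k : Int)) 8) then (2 : Int)
     else if PySem.Int.mod (1 + (k : Int)) 8 = 2 then 1
     else if PySem.Int.mod (1 + (k : Int)) 8 = 4 then 3
     else if PySem.Int.mod (1 + (k : Int)) 8 = 6 then 4
     else 5)
    = PySem.List.pyGetD [2, 1, 2, 3, 2, 4, 2, 5] (PySem.Int.mod (k : Int) 8) 0 := by
  simp only [PySem.Int.mod_eq_emod_of_pos (show (0:Int) < 8 by norm_num)]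
  have h : (k:Int) % 8 = 0 ∨ (k:Int) % 8 = 1 ∨ (k:Int) % 8 = 2 ∨ (k:Int) % 8 = 3 ∨
           (k:Int) % 8 = 4 ∨ (k:Int) % 8 = 5 ∨ (k:Int) % 8 = 6 ∨ (k:Int) % 8 = 7 := by omega
  rcases h with h|h|h|h|h|h|h|h
  · rw [h, show (1 + (k:Int)) % 8 = 1 from by omega]; decide
  · rw [h, show (1 + (k:Int)) % 8 = 2 from by omega]; decide
  · rw [h, show (1 + (k:Int)) % 8 = 3 from by omega]; decide
  · rw [h, show (1 + (k:Int)) % 8 = 4 from by omega]; decide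
  · rw [h, show (1 + (k:Int)) % 8 = 5 from by omega]; decide
  · rw [h, show (1 + (k:Int)) % 8 = 6 from by omega]; decide
  · rw [h, show (1 + (k:Int)) % 8 = 7 from by omega]; decide
  · rw [h, show (1 + (k:Int)) % 8 = 0 from by omega]; decide

theorem pvPat3 (k : Nat) :
    (if [(1 : Int), 2].contains (PySem.Int.mod (1 + (k : Int)) 10) then (3 : Int)
     else if [(3 : Int), 4].contains (PySem.Int.mod (1 + (k : Int)) 10) then 1
     else if [(5 : Int), 6].contains (PySem.Int.mod (1 + (k : Int)) 10) then 2
     else if [(7 : Int), 8].contains (PySem.Int.mod (1 + (k : Int)) 10) then 4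
     else 5)
    = PySem.List.pyGetD [3, 3, 1, 1, 2, 2, 4, 4, 5, 5] (PySem.Int.mod (k : Int) 10) 0 := by
  simp only [PySem.Int.mod_eq_emod_of_pos (show (0:Int) < 10 by norm_num)]
  have h : (k:Int) % 10 = 0 ∨ (k:Int) % 10 = 1 ∨ (k:Int) % 10 = 2 ∨ (k:Int) % 10 = 3 ∨ (k:Int) % 10 = 4 ∨
           (k:Int) % 10 = 5 ∨ (k:Int) % 10 = 6 ∨ (k:Int) % 10 = 7 ∨ (k:Int) % 10 = 8 ∨ (k:Int) % 10 = 9 := by omega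
  rcases h with h|h|h|h|h|h|h|h|h|h
  · rw [h, show (1 + (k:Int)) % 10 = 1 from by omega]; decide
  · rw [h, show (1 + (k:Int)) % 10 = 2 from by omega]; decide
  · rw [h, show (1 + (k:Int)) % 10 = 3 from by omega]; decide
  · rw [h, show (1 + (k:Int)) % 10 = 4 from by omega]; decide
  · rw [h, show (1 + (k:Int)) % 10 = 5 from by omega]; decide
  · rw [h, show (1 + (k:Int)) % 10 = 6 from by omega]; decide
  · rw [h, show (1 + (k:Int)) % 10 = 7 from by omega]; decide
  · rw [h, show (1 + (k:Int)) % 10 = 8 from by omega]; decide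
  · rw [h, show (1 + (k:Int)) % 10 = 9 from by omega]; decide
  · rw [h, show (1 + (k:Int)) % 10 = 0 from by omega]; decide

theorem pvTab1_get (n : Nat) (j : Int) (h0 : 0 ≤ j) (hn : j < (n : Int)) :
    PySem.List.pyGetD (pvTab1 (n : Int)) j 0
    = PySem.List.pyGetD [1, 2, 3, 4, 5] (PySem.Int.mod j 5) 0 := by
  obtain ⟨k, rfl⟩ : ∃ k : Nat, j = (k : Int) := ⟨j.toNat, (Int.toNat_of_nonneg h0).symm⟩
  unfold pvTab1
  have hb : (fun (acc : List Int) (i : Int) =>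
        if PySem.Int.mod i 5 > 0 then acc ++ [PySem.Int.mod i 5] else acc ++ [5])
      = fun acc i => acc ++ [if PySem.Int.mod i 5 > 0 then PySem.Int.mod i 5 else 5] := by
    funext acc i; split_ifs <;> rfl
  rw [hb, PySem.List.foldl_append_singleton_eq_map, List.nil_append]
  rw [PySem.List.pyGetD_map_pyRange_one _ 1 ((n : Int) + 1) k 0 (by omega)]
  exact pvPat1 k

theorem pvTab2_get (n : Nat) (j : Int) (h0 : 0 ≤ j) (hn : j < (n : Int)) :
    PySem.List.pyGetD (pvTab2 (n : Int)) j 0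
    = PySem.List.pyGetD [2, 1, 2, 3, 2, 4, 2, 5] (PySem.Int.mod j 8) 0 := by
  obtain ⟨k, rfl⟩ : ∃ k : Nat, j = (k : Int) := ⟨j.toNat, (Int.toNat_of_nonneg h0).symm⟩
  unfold pvTab2
  have hb : (fun (acc : List Int) (i : Int) =>
        if [(1 : Int), 3, 5, 7].contains (PySem.Int.mod i 8) then acc ++ [2]
        else if PySem.Int.mod i 8 = 2 then acc ++ [1]
        else if PySem.Int.mod i 8 = 4 then acc ++ [3]
        else if PySem.Int.mod i 8 = 6 then acc ++ [4]
        else acc ++ [5])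
      = fun acc i => acc ++ [if [(1 : Int), 3, 5, 7].contains (PySem.Int.mod i 8) then 2
        else if PySem.Int.mod i 8 = 2 then 1
        else if PySem.Int.mod i 8 = 4 then 3
        else if PySem.Int.mod i 8 = 6 then 4
        else 5] := by
    funext acc i; split_ifs <;> rfl
  rw [hb, PySem.List.foldl_append_singleton_eq_map, List.nil_append]
  rw [PySem.List.pyGetD_map_pyRange_one _ 1 ((n : Int) + 1) k 0 (by omega)]
  exact pvPat2 k

theorem pvTab3_get (n : Nat) (j : Int) (h0 : 0 ≤ j) (hn : j < (n : Int)) :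
    PySem.List.pyGetD (pvTab3 (n : Int)) j 0
    = PySem.List.pyGetD [3, 3, 1, 1, 2, 2, 4, 4, 5, 5] (PySem.Int.mod j 10) 0 := by
  obtain ⟨k, rfl⟩ : ∃ k : Nat, j = (k : Int) := ⟨j.toNat, (Int.toNat_of_nonneg h0).symm⟩
  unfold pvTab3
  have hb : (fun (acc : List Int) (i : Int) =>
        if [(1 : Int), 2].contains (PySem.Int.mod i 10) then acc ++ [3]
        else if [(3 : Int), 4].contains (PySem.Int.mod i 10) then acc ++ [1]
        else if [(5 : Int), 6].contains (PySem.Int.mod i 10) then acc ++ [2]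
        else if [(7 : Int), 8].contains (PySem.Int.mod i 10) then acc ++ [4]
        else acc ++ [5])
      = fun acc i => acc ++ [if [(1 : Int), 2].contains (PySem.Int.mod i 10) then 3
        else if [(3 : Int), 4].contains (PySem.Int.mod i 10) then 1
        else if [(5 : Int), 6].contains (PySem.Int.mod i 10) then 2
        else if [(7 : Int), 8].contains (PySem.Int.mod i 10) then 4
        else 5] := by
    funext acc i; split_ifs <;> rfl
  rw [hb, PySem.List.foldl_append_singleton_eq_map, List.nil_append]
  rw [PySem.List.pyGetD_map_pyRange_one _ 1 ((n : Int) + 1) k 0 (by omega)]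
  exact pvPat3 k

theorem pvScore_eq (answers : List Int) : pvScoreA answers = pvScoreB answers := by
  unfold pvScoreA pvScoreB
  rw [PySem.List.enumerate_eq_map_pyRange (d := 0), List.foldl_map]
  simp only [PySem.List.len_eq]
  apply PySem.List.foldl_congr_mem
  intro acc j hj
  rw [PySem.List.mem_pyRange_one] at hj
  rw [pvTab1_get answers.length j hj.1 hj.2, pvTab2_get answers.length j hj.1 hj.2,
      pvTab3_get answers.length j hj.1 hj.2]

theorem pvFinal_eq (sc : Int × Int × Int) : pvFinalA sc = pvFinalB sc := by
  obtain ⟨a, b, c⟩ := sc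
  unfold pvFinalA pvFinalB
  dsimp only
  have hm : (PySem.List.max? [a, b, c] (fun x => x)).getD 0 = max (max a b) c := by
    rw [PySem.List.max?_id_cons]; simp [List.foldl]
  rw [hm]
  have hmem : max (max a b) c = a ∨ max (max a b) c = b ∨ max (max a b) c = c := by
    rcases max_choice (max a b) c with h | h
    · rcases max_choice a b with h2 | h2
      · exact Or.inl (h.trans h2)
      · exact Or.inr (Or.inl (h.trans h2))
    · exact Or.inr (Or.inr h)
  have hcnt : PySem.List.count [a, b, c] (max (max a b) c) ≥ 1 := by
    rcases hmem with h | h | h <;> rw [h] <;> simp [PySem.List.count_eq]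
  rw [if_pos hcnt]
  have hrange : PySem.List.pyRange 0 3 1 = [0, 1, 2] := by decide
  rw [hrange]
  have g0 : PySem.List.pyGetD [a, b, c] 0 0 = a := PySem.List.pyGetD_zero_cons ..
  have g1 : PySem.List.pyGetD [a, b, c] 1 0 = b := by
    simp [PySem.List.pyGetD, PySem.List.pyGet?, PySem.List.pyIdx?]
  have g2 : PySem.List.pyGetD [a, b, c] 2 0 = c := by
    simp [PySem.List.pyGetD, PySem.List.pyGet?, PySem.List.pyIdx?]
  set M := max (max a b) c with hM
  simp only [PySem.List.enumerate_cons, PySem.List.enumerate_nil, List.foldl, List.filterMap,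
    g0, g1, g2]
  by_cases ha : a = M <;> by_cases hb : b = M <;> by_cases hc : c = M <;>
    simp [ha, hb, hc] <;> decide

-- ===== VERDICT (by name: the statement is the Claim_ definition above) =====
theorem solution_spec : Claim_equal_solution := by
  intro answers _
  unfold Spec_solution
  rw [pvSolA, pvSolB, pvScore_eq, pvFinal_eq]
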